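-- pv_equiv track=rewrite | github.com/cattykitty4/str_counters | previous_occurrence/code.py | find_previous_occurrence
-- ===== SOURCE A (Python) =====
-- def find_previous_occurrence(input_line: str) -> list:
--     dct = {}
--     lst = []
--     converted_input = list(input_line.split())
--
--     for word in converted_input:
--         if word not in dct:
--             dct[word] = 0
--             lst.append(dct[word])
--         else:
--             dct[word] += 1
--             lst.append(dct[word])
--     return lst
-- ===== SOURCE B (Python) =====
-- def find_previous_occurrence(input_line: str) -> list:
--     words = input_line.split()
--     return [words[:i].count(w) for i, w in enumerate(words)]
-- ===== Notes on version B (the rewrite author's own statement) =====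
-- stated objective: simpler
-- what changed: Replaced the single-pass running dict with a one-line comprehension that, for each position i, counts word w in the prefix words[:i].
import Mathlib
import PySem

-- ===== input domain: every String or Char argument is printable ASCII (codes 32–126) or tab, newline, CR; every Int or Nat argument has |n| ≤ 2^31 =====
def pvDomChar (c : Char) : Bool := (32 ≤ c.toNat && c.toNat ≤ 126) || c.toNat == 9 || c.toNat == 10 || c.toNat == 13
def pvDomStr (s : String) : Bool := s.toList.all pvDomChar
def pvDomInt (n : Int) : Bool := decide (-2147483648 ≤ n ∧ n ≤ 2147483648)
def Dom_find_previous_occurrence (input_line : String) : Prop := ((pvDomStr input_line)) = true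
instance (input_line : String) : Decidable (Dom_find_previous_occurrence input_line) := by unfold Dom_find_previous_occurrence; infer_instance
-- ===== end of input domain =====

-- B replaces A's running-count dict with a prefix-rescan comprehension: simpler, same values.

-- ===== PORT A =====
def pvStepA (st : PySem.Dict String Int × List Int) (word : String) :
    PySem.Dict String Int × List Int :=
  if st.1.contains word = false then
    let d := st.1.insert word 0
    (d, st.2 ++ [d.getD word 0])
  else
    let d := st.1.modify word 0 (· + 1)
    (d, st.2 ++ [d.getD word 0])

def find_previous_occurrence (input_line : String) : List Int :=
  let converted_input := PySem.Str.split₀ input_line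
  (converted_input.foldl pvStepA (PySem.Dict.empty, [])).2

-- ===== PORT B =====
def find_previous_occurrence_alt (input_line : String) : List Int :=
  let words := PySem.Str.split₀ input_line
  (PySem.List.enumerate words).map
    (fun p => ((PySem.List.count (PySem.List.slice words none (some p.1)) p.2 : Nat) : Int))

-- ===== PRECONDITION & SPEC =====
def Spec_find_previous_occurrence (input_line : String) (out : List Int) : Prop := out = find_previous_occurrence_alt input_line
instance (input_line : String) (out : List Int) : Decidable (Spec_find_previous_occurrence input_line out) := by unfold Spec_find_previous_occurrence; infer_instance

-- ===== CLAIM (what is proved, stated in full; the proofs are below) =====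
def Claim_equal_find_previous_occurrence : Prop := ∀ (input_line : String), Dom_find_previous_occurrence input_line → Spec_find_previous_occurrence input_line (find_previous_occurrence input_line)

-- ===== LEMMAS AND PROOFS =====

-- the common value sequence: element for word w after prefix p is p.count w
def pvRuns (p ws : List String) : List Int :=
  match ws with
  | [] => []
  | w :: ws => ((p.count w : Nat) : Int) :: pvRuns (p ++ [w]) ws

def pvInv (p : List String) (d : PySem.Dict String Int) : Prop :=
  ∀ w, d.get? w = if p.count w = 0 then none else some ((p.count w : Int) - 1)

lemma pvInv_step (p : List String) (d : PySem.Dict String Int) (w : String)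
    (h : pvInv p d) :
    (pvStepA (d, acc) w).2 = acc ++ [((p.count w : Nat) : Int)] ∧
    pvInv (p ++ [w]) (pvStepA (d, acc) w).1 := by
  have hcont : d.contains w = (d.get? w).isSome := PySem.Dict.contains_eq_isSome_get? d w
  by_cases hmem : p.count w = 0
  · have hget : d.get? w = none := by rw [h w]; simp [hmem]
    have hc : d.contains w = false := by rw [hcont, hget]; rfl
    constructor
    · simp [pvStepA, hc, PySem.Dict.getD_insert_self, hmem]
    · intro v
      by_cases hv : v = w
      · subst hv
        simp [pvStepA, hc, PySem.Dict.get?_insert_self, List.count_append, hmem]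
      · simp [pvStepA, hc, PySem.Dict.get?_insert_of_ne _ _ hv, h v,
          List.count_append, List.count_singleton]
        have hv' : ¬ w = v := fun hh => hv hh.symm
        simp [hv']
  · have hget : d.get? w = some ((p.count w : Int) - 1) := by rw [h w]; simp [hmem]
    have hc : d.contains w = true := by rw [hcont, hget]; rfl
    have hgD : d.getD w 0 = (p.count w : Int) - 1 :=
      PySem.Dict.getD_of_get?_eq_some _ _ hget
    constructor
    · have : (d.modify w 0 (· + 1)).getD w 0 = (p.count w : Int) := by
        rw [PySem.Dict.getD_modify_self, hgD]; ring
      simp [pvStepA, hc, this]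
    · intro v
      by_cases hv : v = w
      · subst hv
        have h1 : (d.modify v 0 (· + 1)).getD v 0 = (p.count v : Int) := by
          rw [PySem.Dict.getD_modify_self, hgD]; ring
        have h2 : (d.modify v 0 (· + 1)).get? v =
            some ((d.modify v 0 (· + 1)).getD v 0) := by
          have hs : ((d.modify v 0 (· + 1)).get? v).isSome = true := by
            rw [← PySem.Dict.contains_eq_isSome_get?]
            simp [PySem.Dict.contains_modify]
          rcases Option.isSome_iff_exists.mp hs with ⟨x, hx⟩
          rw [hx, PySem.Dict.getD_of_get?_eq_some _ _ hx]
        rw [pvStepA]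
        simp only [hc]
        simp [h2, h1, List.count_append, hmem]
      · have hne : (d.modify w 0 (· + 1)).get? v = d.get? v := by
          unfold PySem.Dict.modify; exact PySem.Dict.get?_insert_of_ne _ _ hv
        simp [pvStepA, hc, hne, h v, List.count_append, List.count_singleton]
        have hv' : ¬ w = v := fun hh => hv hh.symm
        simp [hv']

lemma loopA (ws : List String) : ∀ (p : List String) (d : PySem.Dict String Int)
    (acc : List Int), pvInv p d →
    (ws.foldl pvStepA (d, acc)).2 = acc ++ pvRuns p ws := by
  induction ws with
  | nil => intro p d acc _; simp [pvRuns]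
  | cons w ws ih =>
    intro p d acc hinv
    obtain ⟨h1, h2⟩ := pvInv_step (acc := acc) p d w hinv
    have := ih (p ++ [w]) (pvStepA (d, acc) w).1 (acc ++ [((p.count w : Nat) : Int)]) h2
    simp only [List.foldl_cons]
    rw [show ws.foldl pvStepA (pvStepA (d, acc) w) =
        ws.foldl pvStepA ((pvStepA (d, acc) w).1, (pvStepA (d, acc) w).2) from rfl, h1]
    rw [this, pvRuns]
    simp

lemma mapB (ws : List String) : ∀ (p : List String),
    (PySem.List.enumerate ws (p.length : Int)).map
      (fun q => ((PySem.List.count (PySem.List.slice (p ++ ws) none (some q.1)) q.2 : Nat) : Int))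
      = pvRuns p ws := by
  induction ws with
  | nil => intro p; simp [PySem.List.enumerate_nil, pvRuns]
  | cons w ws ih =>
    intro p
    rw [PySem.List.enumerate_cons, List.map_cons, pvRuns]
    congr 1
    · simp only [PySem.List.slice_to_natCast, PySem.List.count]
      rw [List.take_left' rfl]
    · have h1 : (p.length : Int) + 1 = ((p ++ [w]).length : Int) := by simp
      have h2 : p ++ w :: ws = (p ++ [w]) ++ ws := by simp
      rw [h1, h2, ih (p ++ [w])]

-- ===== VERDICT (by name: the statement is the Claim_ definition above) =====
theorem find_previous_occurrence_spec : Claim_equal_find_previous_occurrence := by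
  intro input_line _
  unfold Spec_find_previous_occurrence find_previous_occurrence find_previous_occurrence_alt
  have hinv : pvInv [] PySem.Dict.empty := by
    intro w; simp [PySem.Dict.get?_empty]
  rw [loopA _ [] _ [] hinv]
  have := mapB (PySem.Str.split₀ input_line) []
  simpa using this.symm
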